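-- pv_equiv track=rewrite | github.com/weixiangtoh/daily_interview | MonsoonUmbrellas.py | getUmbrellas
-- ===== SOURCE A (Python) =====
-- def getUmbrellas(requirement, sizes):
--     stack = [0] + [float('inf')] * requirement
--
--     for umbrella in sizes:
--         for i in range(umbrella, requirement+1):
--             stack[i] = min(stack[i], stack[i-umbrella]+1)
--
--     if stack[-1] != float('inf'):
--         return stack[-1]
--     else:
--         return -1
-- ===== SOURCE B (Python) =====
-- def getUmbrellas(requirement, sizes):
--     # Unweighted shortest path on partial sums 0..requirement: BFS by levels from 0,
--     # one edge per usable umbrella size; the first level containing `requirement`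
--     # is the minimum number of umbrellas, -1 if the search dies out.
--     if requirement <= 0:
--         return 0
--     steps = {s for s in sizes if 0 < s <= requirement}
--     visited = {0}
--     frontier = {0}
--     level = 0
--     while frontier:
--         if requirement in frontier:
--             return level
--         nxt = {v + s for v in frontier for s in steps
--                if v + s <= requirement and v + s not in visited}
--         visited |= nxt
--         frontier = nxt
--         level += 1
--     return -1
-- ===== Notes on version B (the rewrite author's own statement) =====
-- stated objective: alternative
-- what changed: B reframes the task as unweighted shortest path on partial sums 0..requirement and runs a breadth-first search by levels from 0 with a frontier set and a visited set (one edge per usable umbrella size), returning the first BFS level containing requirement, instead of A's coin-major DP sweep relaxing a cost table in place; Pre_ excludes exactly the inputs on which A raises IndexError (a negative size reaching outside the table).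
import Mathlib
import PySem

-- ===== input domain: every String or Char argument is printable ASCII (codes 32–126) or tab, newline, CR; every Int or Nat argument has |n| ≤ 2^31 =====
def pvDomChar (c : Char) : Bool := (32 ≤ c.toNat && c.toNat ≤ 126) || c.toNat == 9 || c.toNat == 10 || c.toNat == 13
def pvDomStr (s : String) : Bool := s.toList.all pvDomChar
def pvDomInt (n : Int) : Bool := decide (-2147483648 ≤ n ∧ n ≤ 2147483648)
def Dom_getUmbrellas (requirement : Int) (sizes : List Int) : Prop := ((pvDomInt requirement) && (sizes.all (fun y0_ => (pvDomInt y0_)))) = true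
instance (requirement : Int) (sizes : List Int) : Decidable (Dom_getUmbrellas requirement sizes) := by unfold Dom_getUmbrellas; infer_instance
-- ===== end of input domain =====

-- B replaces A's coin-major relax-in-place DP sweep by a breadth-first search by levels over the
-- partial sums 0..requirement, with a frontier set and a visited set (objective: alternative).

-- ===== PORT A =====
-- cells are Option Int: 'none' models Python's float('inf')
def pvMinInf : Option Int → Option Int → Option Int
  | none, b => b
  | some a, none => some a
  | some a, some b => some (min a b)

def pvInfAdd1 : Option Int → Option Int
  | none => none
  | some a => some (a + 1)

def getUmbrellas (requirement : Int) (sizes : List Int) : Int :=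
  let stack0 : List (Option Int) := [some 0] ++ PySem.List.pyRepeat [(none : Option Int)] requirement
  let stack := sizes.foldl (fun st umbrella =>
    (PySem.List.pyRange umbrella (requirement + 1) 1).foldl (fun st i =>
      PySem.List.pySetD st i
        (pvMinInf (PySem.List.pyGetD st i none) (pvInfAdd1 (PySem.List.pyGetD st (i - umbrella) none)))) st) stack0
  match PySem.List.pyGetD stack (-1) none with
  | some v => v
  | none => -1

-- ===== PORT B =====
-- one BFS expansion: {v + s | v in frontier, s in steps, v+s <= requirement, v+s not in visited}
def pvBfsNext (requirement : Int) (steps : PySem.Set Int) (visited : PySem.Set Int)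
    (frontier : PySem.Set Int) : PySem.Set Int :=
  frontier.foldl (fun acc v =>
    steps.foldl (fun acc s =>
      if v + s ≤ requirement ∧ v + s ∉ visited then PySem.Set.add acc (v + s) else acc) acc)
    PySem.Set.empty

-- the 'while frontier:' loop; fuel only makes the recursion total (requirement+2 levels always suffice)
def pvBfsLoop (requirement : Int) (steps : PySem.Set Int) :
    Nat → PySem.Set Int → PySem.Set Int → Int → Int
  | 0, _, _, _ => -1
  | fuel+1, visited, frontier, level =>
    if frontier = [] then -1
    else if requirement ∈ frontier then level
    else
      pvBfsLoop requirement steps fuel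
        (PySem.Set.union visited (pvBfsNext requirement steps visited frontier))
        (pvBfsNext requirement steps visited frontier) (level + 1)

def getUmbrellas_alt (requirement : Int) (sizes : List Int) : Int :=
  if requirement ≤ 0 then 0
  else
    let steps := PySem.Set.ofList (sizes.filter (fun s => decide (0 < s ∧ s ≤ requirement)))
    pvBfsLoop requirement steps (requirement.toNat + 2)
      (PySem.Set.ofList [0]) (PySem.Set.ofList [0]) 0

-- ===== PRECONDITION & SPEC =====
-- Pre_ excludes exactly the inputs on which A raises IndexError (a negative size makes the inner
-- loop index i-umbrella reach outside the table); A returns on every input satisfying Pre_.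
def Pre_getUmbrellas (requirement : Int) (sizes : List Int) : Prop :=
  ∀ s ∈ sizes, if 0 ≤ requirement then 0 ≤ s else min requirement (-2) < s
instance (requirement : Int) (sizes : List Int) : Decidable (Pre_getUmbrellas requirement sizes) := by
  unfold Pre_getUmbrellas; infer_instance

def pvWitness_getUmbrellas : Int × List Int := (3, [1, 2])

def Spec_getUmbrellas (requirement : Int) (sizes : List Int) (out : Int) : Prop := out = getUmbrellas_alt requirement sizes
instance (requirement : Int) (sizes : List Int) (out : Int) : Decidable (Spec_getUmbrellas requirement sizes out) := by unfold Spec_getUmbrellas; infer_instance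

-- ===== CLAIM (what is proved, stated in full; the proofs are below) =====
def Claim_equal_getUmbrellas : Prop := ∀ (requirement : Int) (sizes : List Int), Dom_getUmbrellas requirement sizes → Pre_getUmbrellas requirement sizes → Spec_getUmbrellas requirement sizes (getUmbrellas requirement sizes)

-- ===== LEMMAS AND PROOFS =====

-- pvReach cs k v: v is the sum of exactly k umbrella sizes drawn (with repetition) from cs
def pvReach (cs : List Int) : Nat → Int → Bool
  | 0, v => v == 0
  | k+1, v => cs.any (fun s => pvReach cs k (v - s))

-- first k in [start, start+fuel) with p k
def pvFirst (p : Nat → Bool) : Nat → Nat → Option Nat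
  | 0, _ => none
  | fuel+1, start => if p start then some start else pvFirst p fuel (start+1)

def pvMin (cs : List Int) (v : Int) : Option Nat := pvFirst (fun k => pvReach cs k v) (v.toNat + 1) 0

def pvCell (cs : List Int) (v : Int) : Option Int := (pvMin cs v).map (fun m => (m : Int))

def pvTable (cs : List Int) (n : Nat) : List (Option Int) :=
  (List.range (n+1)).map (fun (i : Nat) => pvCell cs ((i : Nat) : Int))

def pvHyb (cs : List Int) (c : Int) (j : Int) (n : Nat) : List (Option Int) :=
  (List.range (n+1)).map (fun (i : Nat) =>
    if ((i : Nat) : Int) < j then pvCell (cs ++ [c]) ((i : Nat) : Int) else pvCell cs ((i : Nat) : Int))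

theorem pvFirst_some (p : Nat → Bool) (fuel start m : Nat) (h : pvFirst p fuel start = some m) :
    p m = true ∧ start ≤ m ∧ m < start + fuel ∧ ∀ j, start ≤ j → j < m → p j = false := by
  induction fuel generalizing start with
  | zero => simp [pvFirst] at h
  | succ f ih =>
    unfold pvFirst at h
    by_cases hp : p start = true
    · simp [hp] at h
      subst h
      exact ⟨hp, le_refl _, by omega, fun j h1 h2 => by omega⟩
    · simp [hp] at h
      obtain ⟨h1, h2, h3, h4⟩ := ih (start+1) h
      refine ⟨h1, by omega, by omega, fun j hj1 hj2 => ?_⟩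
      rcases Nat.eq_or_lt_of_le hj1 with rfl | hlt
      · simpa using hp
      · exact h4 j hlt hj2

theorem pvFirst_none (p : Nat → Bool) (fuel start : Nat) :
    pvFirst p fuel start = none ↔ ∀ j, start ≤ j → j < start + fuel → p j = false := by
  induction fuel generalizing start with
  | zero => simp [pvFirst]; omega
  | succ f ih =>
    unfold pvFirst
    by_cases hp : p start = true
    · simp [hp]
      exact ⟨start, le_refl _, by omega, hp⟩
    · simp [hp, ih (start+1)]
      constructor
      · intro h j h1 h2
        rcases Nat.eq_or_lt_of_le h1 with rfl | hlt
        · simpa using hp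
        · exact h j hlt (by omega)
      · intro h j h1 h2
        exact h j (by omega) (by omega)

theorem pvFirst_of (p : Nat → Bool) (fuel start m : Nat) (hm : p m = true)
    (hmin : ∀ j, start ≤ j → j < m → p j = false) (h1 : start ≤ m) (h2 : m < start + fuel) :
    pvFirst p fuel start = some m := by
  induction fuel generalizing start with
  | zero => omega
  | succ f ih =>
    unfold pvFirst
    rcases Nat.eq_or_lt_of_le h1 with rfl | hlt
    · simp [hm]
    · have hps : p start = false := hmin start (le_refl _) hlt
      simp [hps]
      exact ih (start+1) (fun j hj1 hj2 => hmin j (by omega) hj2) hlt (by omega)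

theorem reach_nonneg (cs : List Int) (hcs : ∀ s ∈ cs, 0 ≤ s) (k : Nat) (v : Int)
    (h : pvReach cs k v = true) : 0 ≤ v := by
  induction k generalizing v with
  | zero => simp [pvReach] at h; omega
  | succ k ih =>
    simp [pvReach, List.any_eq_true] at h
    obtain ⟨s, hs, hr⟩ := h
    have := ih (v - s) hr
    have := hcs s hs
    omega

theorem reach_shrink (cs : List Int) (hcs : ∀ s ∈ cs, 0 ≤ s) (k : Nat) (v : Int)
    (h : pvReach cs k v = true) : ∃ k', k' ≤ k ∧ (k' : Int) ≤ v ∧ pvReach cs k' v = true := by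
  induction k generalizing v with
  | zero =>
    refine ⟨0, le_refl _, ?_, h⟩
    simp [pvReach] at h; omega
  | succ k ih =>
    simp only [pvReach, List.any_eq_true] at h
    obtain ⟨s, hs, hr⟩ := h
    obtain ⟨k', hk1, hk2, hk3⟩ := ih (v - s) hr
    have hs0 := hcs s hs
    rcases eq_or_lt_of_le hs0 with rfl | hpos
    · exact ⟨k', by omega, by omega, by simpa using hk3⟩
    · refine ⟨k' + 1, by omega, by omega, ?_⟩
      simp only [pvReach, List.any_eq_true]
      exact ⟨s, hs, hk3⟩

theorem reach_mono (cs : List Int) (c : Int) (k : Nat) (v : Int)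
    (h : pvReach cs k v = true) : pvReach (cs ++ [c]) k v = true := by
  induction k generalizing v with
  | zero => exact h
  | succ k ih =>
    simp only [pvReach, List.any_eq_true] at h ⊢
    obtain ⟨s, hs, hr⟩ := h
    exact ⟨s, by simp [hs], ih (v - s) hr⟩

theorem pvMin_some (cs : List Int) (v : Int) (m : Nat) (h : pvMin cs v = some m) :
    pvReach cs m v = true ∧ ∀ j, j < m → pvReach cs j v = false := by
  obtain ⟨h1, _, _, h4⟩ := pvFirst_some _ _ _ _ h
  exact ⟨h1, fun j hj => h4 j (by omega) hj⟩

theorem pvMin_none (cs : List Int) (hcs : ∀ s ∈ cs, 0 ≤ s) (v : Int) :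
    pvMin cs v = none ↔ ∀ k, pvReach cs k v = false := by
  unfold pvMin
  rw [pvFirst_none]
  constructor
  · intro h k
    by_contra hk
    rw [Bool.not_eq_false] at hk
    obtain ⟨k', hk1, hk2, hk3⟩ := reach_shrink cs hcs k v hk
    have hv0 : 0 ≤ v := reach_nonneg cs hcs k' v hk3
    have : k' < 0 + (v.toNat + 1) := by omega
    have := h k' (by omega) this
    rw [hk3] at this; exact Bool.true_eq_false.mp this
  · intro h j _ _
    exact h j

theorem pvMin_of (cs : List Int) (hcs : ∀ s ∈ cs, 0 ≤ s) (v : Int) (m : Nat)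
    (hm : pvReach cs m v = true) (hmin : ∀ j, j < m → pvReach cs j v = false) :
    pvMin cs v = some m := by
  obtain ⟨k', hk1, hk2, hk3⟩ := reach_shrink cs hcs m v hm
  have hv0 : 0 ≤ v := reach_nonneg cs hcs m v hm
  have : k' = m := by
    rcases Nat.eq_or_lt_of_le hk1 with h | h
    · exact h
    · have := hmin k' h
      rw [hk3] at this; exact absurd this (by simp)
  subst this
  exact pvFirst_of _ _ _ _ hm (fun j _ hj => hmin j hj) (by omega) (by omega)

theorem min_le_of_reach (cs : List Int) (hcs : ∀ s ∈ cs, 0 ≤ s) (k : Nat) (v : Int)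
    (h : pvReach cs k v = true) : ∃ M, pvMin cs v = some M ∧ M ≤ k := by
  cases hM : pvMin cs v with
  | none => rw [pvMin_none cs hcs] at hM; rw [hM k] at h; exact absurd h (by simp)
  | some M =>
    obtain ⟨h1, h2⟩ := pvMin_some cs v M hM
    refine ⟨M, rfl, ?_⟩
    by_contra hlt
    have := h2 k (by omega)
    rw [this] at h; exact absurd h (by simp)

theorem pvMin_zero (cs : List Int) : pvMin cs 0 = some 0 := by
  simp [pvMin, pvFirst, pvReach]

theorem reach_big (cs : List Int) (hcs : ∀ s ∈ cs, 0 ≤ s) (c : Int) (hc : 0 ≤ c) (k : Nat)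
    (v : Int) (hv : v < c) : pvReach (cs ++ [c]) k v = pvReach cs k v := by
  induction k generalizing v with
  | zero => rfl
  | succ k ih =>
    rw [Bool.eq_iff_iff]
    simp only [pvReach, List.any_eq_true, List.any_append, Bool.or_eq_true, List.any_cons,
      List.any_nil, Bool.or_false]
    constructor
    · rintro (⟨s, hs, hr⟩ | hr)
      · have hs0 := hcs s hs
        rw [ih (v - s) (by omega)] at hr
        exact ⟨s, hs, hr⟩
      · exfalso
        have : 0 ≤ v - c := reach_nonneg _ (by
          intro s hs
          rcases List.mem_append.mp hs with h | h
          · exact hcs s h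
          · simp at h; omega) _ _ hr
        omega
    · rintro ⟨s, hs, hr⟩
      have hs0 := hcs s hs
      rw [← ih (v - s) (by omega)] at hr
      exact Or.inl ⟨s, hs, hr⟩

theorem pvMin_big (cs : List Int) (hcs : ∀ s ∈ cs, 0 ≤ s) (c : Int) (hc : 0 ≤ c) (v : Int)
    (hv : v < c) : pvMin (cs ++ [c]) v = pvMin cs v := by
  unfold pvMin
  congr 1
  funext k
  exact reach_big cs hcs c hc k v hv

theorem reach_zero_coin (cs : List Int) (k : Nat) (v : Int)
    (h : pvReach (cs ++ [0]) k v = true) : ∃ k', k' ≤ k ∧ pvReach cs k' v = true := by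
  induction k generalizing v with
  | zero => exact ⟨0, le_refl _, h⟩
  | succ k ih =>
    simp only [pvReach, List.any_eq_true, List.any_append, Bool.or_eq_true, List.any_cons,
      List.any_nil, Bool.or_false] at h
    rcases h with ⟨s, hs, hr⟩ | hr
    · obtain ⟨k', hk1, hk2⟩ := ih (v - s) hr
      refine ⟨k' + 1, by omega, ?_⟩
      simp only [pvReach, List.any_eq_true]
      exact ⟨s, hs, hk2⟩
    · obtain ⟨k', hk1, hk2⟩ := ih (v - 0) hr
      exact ⟨k', by omega, by simpa using hk2⟩

theorem pvMin_zero_coin (cs : List Int) (hcs : ∀ s ∈ cs, 0 ≤ s) (v : Int) :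
    pvMin (cs ++ [0]) v = pvMin cs v := by
  have hcs' : ∀ s ∈ cs ++ [0], 0 ≤ s := by
    intro s hs
    rcases List.mem_append.mp hs with h | h
    · exact hcs s h
    · simp at h; omega
  cases hM : pvMin cs v with
  | none =>
    rw [pvMin_none cs hcs v] at hM
    rw [pvMin_none _ hcs' v]
    intro k
    by_contra hk
    rw [Bool.not_eq_false] at hk
    obtain ⟨k', _, hk2⟩ := reach_zero_coin cs k v hk
    rw [hM k'] at hk2
    exact Bool.false_eq_true.mp hk2
  | some M =>
    obtain ⟨h1, h2⟩ := pvMin_some cs v M hM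
    refine pvMin_of _ hcs' v M (reach_mono cs 0 M v h1) ?_
    intro j hj
    by_contra hk
    rw [Bool.not_eq_false] at hk
    obtain ⟨k', hk1, hk2⟩ := reach_zero_coin cs j v hk
    rw [h2 k' (by omega)] at hk2
    exact Bool.false_eq_true.mp hk2

theorem reach_split (cs : List Int) (c : Int) (k : Nat) (v : Int) :
    pvReach (cs ++ [c]) k v = true ↔
      pvReach cs k v = true ∨ (∃ k', k = k' + 1 ∧ pvReach (cs ++ [c]) k' (v - c) = true) := by
  induction k generalizing v with
  | zero =>
    simp only [pvReach]
    constructor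
    · intro h; exact Or.inl h
    · rintro (h | ⟨k', hk, _⟩)
      · exact h
      · omega
  | succ k ih =>
    constructor
    · intro h
      simp only [pvReach, List.any_eq_true, List.any_append, Bool.or_eq_true, List.any_cons,
        List.any_nil, Bool.or_false] at h
      rcases h with ⟨s, hs, hr⟩ | hr
      · rcases (ih (v - s)).mp hr with h' | ⟨k', rfl, h'⟩
        · left
          simp only [pvReach, List.any_eq_true]
          exact ⟨s, hs, h'⟩
        · right
          refine ⟨k' + 1, rfl, ?_⟩
          simp only [pvReach, List.any_eq_true, List.any_append, Bool.or_eq_true]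
          left
          refine ⟨s, hs, ?_⟩
          have heq : v - c - s = v - s - c := by ring
          rw [heq]
          exact h'
      · exact Or.inr ⟨k, rfl, hr⟩
    · rintro (h | ⟨k', hk, h⟩)
      · exact reach_mono cs c _ v h
      · have hk' : k = k' := by omega
        subst hk'
        simp only [pvReach, List.any_eq_true, List.any_append, Bool.or_eq_true, List.any_cons,
          List.any_nil, Bool.or_false]
        exact Or.inr h

-- A's relaxation step computes the new cell from the old cell and the (already new) cell c below
theorem pvCell_step (cs : List Int) (hcs : ∀ s ∈ cs, 0 ≤ s) (c : Int) (hc : 0 ≤ c) (v : Int)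
    (_hcv : c ≤ v) :
    pvCell (cs ++ [c]) v = pvMinInf (pvCell cs v) (pvInfAdd1 (pvCell (cs ++ [c]) (v - c))) := by
  have hcs' : ∀ s ∈ cs ++ [c], 0 ≤ s := by
    intro s hs
    rcases List.mem_append.mp hs with h | h
    · exact hcs s h
    · simp at h; omega
  cases hA : pvMin cs v with
  | none =>
    cases hB : pvMin (cs ++ [c]) (v - c) with
    | none =>
      have hL : pvMin (cs ++ [c]) v = none := by
        rw [pvMin_none _ hcs']
        intro k
        by_contra hk
        rw [Bool.not_eq_false] at hk
        rcases (reach_split cs c k v).mp hk with h | ⟨k', rfl, h⟩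
        · rw [(pvMin_none cs hcs v).mp hA k] at h; exact Bool.false_eq_true.mp h
        · rw [(pvMin_none _ hcs' (v - c)).mp hB k'] at h; exact Bool.false_eq_true.mp h
      simp [pvCell, hL, hA, hB, pvMinInf, pvInfAdd1]
    | some b =>
      obtain ⟨hb1, hb2⟩ := pvMin_some _ _ _ hB
      have hL : pvMin (cs ++ [c]) v = some (b + 1) := by
        apply pvMin_of _ hcs' v (b + 1)
        · exact (reach_split cs c (b + 1) v).mpr (Or.inr ⟨b, rfl, hb1⟩)
        · intro j hj
          by_contra hk
          rw [Bool.not_eq_false] at hk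
          rcases (reach_split cs c j v).mp hk with h | ⟨k', rfl, h⟩
          · rw [(pvMin_none cs hcs v).mp hA j] at h; exact Bool.false_eq_true.mp h
          · rw [hb2 k' (by omega)] at h; exact Bool.false_eq_true.mp h
      simp [pvCell, hL, hA, hB, pvMinInf, pvInfAdd1]
  | some a =>
    obtain ⟨ha1, ha2⟩ := pvMin_some _ _ _ hA
    cases hB : pvMin (cs ++ [c]) (v - c) with
    | none =>
      have hL : pvMin (cs ++ [c]) v = some a := by
        apply pvMin_of _ hcs' v a (reach_mono cs c a v ha1)
        intro j hj
        by_contra hk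
        rw [Bool.not_eq_false] at hk
        rcases (reach_split cs c j v).mp hk with h | ⟨k', rfl, h⟩
        · rw [ha2 j hj] at h; exact Bool.false_eq_true.mp h
        · rw [(pvMin_none _ hcs' (v - c)).mp hB k'] at h; exact Bool.false_eq_true.mp h
      simp [pvCell, hL, hA, hB, pvMinInf, pvInfAdd1]
    | some b =>
      obtain ⟨hb1, hb2⟩ := pvMin_some _ _ _ hB
      have hL : pvMin (cs ++ [c]) v = some (min a (b + 1)) := by
        apply pvMin_of _ hcs' v (min a (b + 1))
        · rcases le_total a (b + 1) with h | h
          · rw [min_eq_left h]; exact reach_mono cs c a v ha1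
          · rw [min_eq_right h]
            exact (reach_split cs c (b + 1) v).mpr (Or.inr ⟨b, rfl, hb1⟩)
        · intro j hj
          by_contra hk
          rw [Bool.not_eq_false] at hk
          rcases (reach_split cs c j v).mp hk with h | ⟨k', rfl, h⟩
          · rw [ha2 j (by omega)] at h; exact Bool.false_eq_true.mp h
          · rw [hb2 k' (by omega)] at h; exact Bool.false_eq_true.mp h
      simp [pvCell, hL, hA, hB, pvMinInf, pvInfAdd1]

theorem pvFoldl_const {α β : Type} (l : List β) (f : α → β → α) (a : α)
    (h : ∀ x ∈ l, f a x = a) : l.foldl f a = a := by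
  induction l with
  | nil => rfl
  | cons x xs ih =>
    rw [List.foldl_cons, h x (by simp)]
    exact ih (fun y hy => h y (by simp [hy]))

theorem pvMinInf_self (x : Option Int) : pvMinInf x (pvInfAdd1 x) = x := by
  cases x with
  | none => rfl
  | some a =>
    simp only [pvMinInf, pvInfAdd1, Option.some.injEq]
    omega

theorem pvMin_nil (v : Int) (hv : v ≠ 0) : pvMin [] v = none := by
  rw [pvMin_none [] (by simp) v]
  intro k
  cases k with
  | zero => simp [pvReach, hv]
  | succ k => simp [pvReach]

theorem pvTable_init (n : Nat) :
    [some (0:Int)] ++ PySem.List.pyRepeat [(none : Option Int)] (n : Int) = pvTable [] n := by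
  rw [PySem.List.pyRepeat_singleton]
  simp only [Int.toNat_natCast]
  unfold pvTable
  induction n with
  | zero => simp [pvCell, pvMin_zero]
  | succ m ih =>
    rw [List.range_succ, List.map_append, ← ih, List.map_singleton]
    have hnone : pvCell [] (((m + 1 : Nat) : Nat) : Int) = none := by
      unfold pvCell
      rw [pvMin_nil _ (by push_cast; omega)]
      rfl
    rw [hnone, List.replicate_succ', ← List.append_assoc]

theorem pvHyb_length (cs : List Int) (c j : Int) (n : Nat) : (pvHyb cs c j n).length = n + 1 := by
  simp [pvHyb]

theorem pvHyb_read (cs : List Int) (c j i : Int) (n : Nat) (hi0 : 0 ≤ i) (hin : i ≤ (n : Int)) :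
    PySem.List.pyGetD (pvHyb cs c j n) i none =
      (if i < j then pvCell (cs ++ [c]) i else pvCell cs i) := by
  have hlt : i < ((pvHyb cs c j n).length : Int) := by rw [pvHyb_length]; push_cast; omega
  rw [PySem.List.pyGetD_eq_getElem _ none hi0 hlt]
  have hbound : i.toNat < n + 1 := by omega
  simp only [pvHyb, List.getElem_map, List.getElem_range]
  rw [Int.toNat_of_nonneg hi0]

theorem pvInnerStep (cs : List Int) (hcs : ∀ s ∈ cs, 0 ≤ s) (c : Int) (hc : 0 ≤ c) (n : Nat)
    (j : Int) (hcj : c ≤ j) (hjn : j ≤ (n : Int)) :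
    PySem.List.pySetD (pvHyb cs c j n) j
      (pvMinInf (PySem.List.pyGetD (pvHyb cs c j n) j none)
        (pvInfAdd1 (PySem.List.pyGetD (pvHyb cs c j n) (j - c) none))) = pvHyb cs c (j + 1) n := by
  have hj0 : 0 ≤ j := le_trans hc hcj
  have hnew : pvMinInf (PySem.List.pyGetD (pvHyb cs c j n) j none)
      (pvInfAdd1 (PySem.List.pyGetD (pvHyb cs c j n) (j - c) none)) = pvCell (cs ++ [c]) j := by
    rw [pvHyb_read cs c j j n hj0 hjn, if_neg (lt_irrefl j),
        pvHyb_read cs c j (j - c) n (by omega) (by omega)]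
    rcases eq_or_lt_of_le hc with rfl | hcpos
    · rw [if_neg (by omega), sub_zero, pvMinInf_self]
      unfold pvCell
      rw [pvMin_zero_coin cs hcs j]
    · rw [if_pos (by omega)]
      exact (pvCell_step cs hcs c hc j hcj).symm
  rw [hnew, PySem.List.pySetD_of_nonneg _ _ hj0]
  apply List.ext_getElem
  · simp [pvHyb]
  · intro idx h1 h2
    have hidxn : idx < n + 1 := by simpa [pvHyb] using h2
    simp only [pvHyb, List.getElem_set, List.getElem_map, List.getElem_range]
    by_cases hidx : idx = j.toNat
    · subst hidx
      rw [if_pos rfl, if_pos (by omega)]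
      congr 1
      omega
    · rw [if_neg (fun h => hidx h.symm)]
      have hne : (idx : Int) ≠ j := by omega
      by_cases hlt : (idx : Int) < j
      · rw [if_pos hlt, if_pos (by omega)]
      · rw [if_neg hlt, if_neg (by omega)]

theorem pvInnerFold (cs : List Int) (hcs : ∀ s ∈ cs, 0 ≤ s) (c : Int) (hc : 0 ≤ c) (n : Nat) :
    ∀ (d : Nat) (j : Int), c ≤ j → j ≤ (n : Int) + 1 → (((n : Int) + 1 - j).toNat = d) →
    (PySem.List.pyRange j ((n : Int) + 1) 1).foldl (fun st i =>
      PySem.List.pySetD st i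
        (pvMinInf (PySem.List.pyGetD st i none)
          (pvInfAdd1 (PySem.List.pyGetD st (i - c) none)))) (pvHyb cs c j n) =
      pvHyb cs c ((n : Int) + 1) n := by
  intro d
  induction d with
  | zero =>
    intro j hcj hjn hd
    have : j = (n : Int) + 1 := by omega
    subst this
    rw [PySem.List.pyRange_one_eq_nil (le_refl _)]
    rfl
  | succ d ih =>
    intro j hcj hjn hd
    have hlt : j < (n : Int) + 1 := by omega
    rw [PySem.List.pyRange_one_cons hlt, List.foldl_cons]
    rw [pvInnerStep cs hcs c hc n j hcj (by omega)]
    exact ih (j + 1) (by omega) (by omega) (by omega)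

theorem pvInnerAll (cs : List Int) (hcs : ∀ s ∈ cs, 0 ≤ s) (c : Int) (hc : 0 ≤ c) (n : Nat) :
    (PySem.List.pyRange c ((n : Int) + 1) 1).foldl (fun st i =>
      PySem.List.pySetD st i
        (pvMinInf (PySem.List.pyGetD st i none)
          (pvInfAdd1 (PySem.List.pyGetD st (i - c) none)))) (pvTable cs n) =
      pvTable (cs ++ [c]) n := by
  have htp : ∀ (j : Int), (n : Int) < j → pvHyb cs c j n = pvTable (cs ++ [c]) n := by
    intro j hj
    unfold pvHyb pvTable
    apply List.map_congr_left
    intro i hi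
    have : (i : Int) < j := by
      have := List.mem_range.mp hi
      omega
    rw [if_pos this]
  by_cases hle : c ≤ (n : Int) + 1
  · have hlow : pvHyb cs c c n = pvTable cs n := by
      unfold pvHyb pvTable
      apply List.map_congr_left
      intro i hi
      by_cases h : (i : Int) < c
      · rw [if_pos h]
        unfold pvCell
        rw [pvMin_big cs hcs c hc _ h]
      · rw [if_neg h]
    rw [← hlow, pvInnerFold cs hcs c hc n ((n : Int) + 1 - c).toNat c (le_refl _) hle rfl]
    exact htp _ (by omega)
  · have hgt : (n : Int) + 1 < c := by omega
    rw [PySem.List.pyRange_one_eq_nil (by omega)]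
    simp only [List.foldl_nil]
    unfold pvTable
    apply List.map_congr_left
    intro i hi
    have := List.mem_range.mp hi
    unfold pvCell
    rw [pvMin_big cs hcs c hc _ (by omega)]

theorem pvOuterFold (n : Nat) : ∀ (ss cs : List Int), (∀ s ∈ cs, 0 ≤ s) → (∀ s ∈ ss, 0 ≤ s) →
    ss.foldl (fun st umbrella =>
      (PySem.List.pyRange umbrella ((n : Int) + 1) 1).foldl (fun st i =>
        PySem.List.pySetD st i
          (pvMinInf (PySem.List.pyGetD st i none)
            (pvInfAdd1 (PySem.List.pyGetD st (i - umbrella) none)))) st) (pvTable cs n) =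
      pvTable (cs ++ ss) n := by
  intro ss
  induction ss with
  | nil => intro cs _ _; simp
  | cons c ss' ih =>
    intro cs hcs hss
    rw [List.foldl_cons, pvInnerAll cs hcs c (hss c (by simp)) n]
    have hcs' : ∀ s ∈ cs ++ [c], 0 ≤ s := by
      intro s hs
      rcases List.mem_append.mp hs with h | h
      · exact hcs s h
      · simp at h; rw [h]; exact hss c (by simp)
    rw [ih (cs ++ [c]) hcs' (fun s hs => hss s (by simp [hs]))]
    rw [List.append_assoc]
    rfl

theorem getUmbrellas_neg (requirement : Int) (sizes : List Int) (hr : requirement < 0)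
    (hp : Pre_getUmbrellas requirement sizes) : getUmbrellas requirement sizes = 0 := by
  have hrep : PySem.List.pyRepeat [(none : Option Int)] requirement = [] := by
    rw [PySem.List.pyRepeat_singleton]
    have h0 : requirement.toNat = 0 := by omega
    rw [h0]
    rfl
  unfold getUmbrellas
  rw [hrep]
  simp only [List.append_nil]
  rw [pvFoldl_const]
  · rfl
  · intro u hu
    have hpu := hp u hu
    rw [if_neg (by omega)] at hpu
    by_cases hle : requirement + 1 ≤ u
    · rw [PySem.List.pyRange_one_eq_nil hle]
      rfl
    · have h1 : requirement = -1 := by omega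
      have h2 : u = -1 := by omega
      subst h1; subst h2
      decide

theorem getUmbrellas_nonneg (n : Nat) (sizes : List Int) (hcs : ∀ s ∈ sizes, 0 ≤ s) :
    getUmbrellas (n : Int) sizes = (match pvCell sizes (n : Int) with
      | some v => v
      | none => -1) := by
  unfold getUmbrellas
  dsimp only
  rw [pvTable_init n, pvOuterFold n sizes [] (by simp) hcs]
  have : pvTable ([] ++ sizes) n =
      ((List.range n).map (fun (i : Nat) => pvCell sizes ((i : Nat) : Int))) ++ [pvCell sizes (n : Int)] := by
    unfold pvTable
    rw [List.range_succ, List.map_append]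
    rfl
  rw [this, PySem.List.pyGetD_neg_one_append_singleton]

-- ============ B-side (BFS) lemmas ============

theorem pvReach_congr (cs cs' : List Int) (h : ∀ s, s ∈ cs ↔ s ∈ cs') (k : Nat) (v : Int) :
    pvReach cs k v = pvReach cs' k v := by
  induction k generalizing v with
  | zero => rfl
  | succ k ih =>
    rw [Bool.eq_iff_iff]
    simp only [pvReach, List.any_eq_true]
    constructor <;> rintro ⟨s, hs, hr⟩
    · exact ⟨s, (h s).mp hs, by rw [← ih]; exact hr⟩
    · exact ⟨s, (h s).mpr hs, by rw [ih]; exact hr⟩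

theorem pvMin_congr (cs cs' : List Int) (h : ∀ s, s ∈ cs ↔ s ∈ cs') (v : Int) :
    pvMin cs v = pvMin cs' v := by
  unfold pvMin
  congr 1
  funext k
  exact pvReach_congr cs cs' h k v

theorem pvReach_subset (cs cs' : List Int) (h : ∀ s ∈ cs', s ∈ cs) (k : Nat) (v : Int)
    (hr : pvReach cs' k v = true) : pvReach cs k v = true := by
  induction k generalizing v with
  | zero => exact hr
  | succ k ih =>
    simp only [pvReach, List.any_eq_true] at hr ⊢
    obtain ⟨s, hs, hr'⟩ := hr
    exact ⟨s, h s hs, ih (v - s) hr'⟩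

theorem pvReach_pos_le (cs : List Int) (h : ∀ s ∈ cs, 0 < s) (k : Nat) (v : Int)
    (hr : pvReach cs k v = true) : (k : Int) ≤ v := by
  induction k generalizing v with
  | zero => simp [pvReach] at hr; omega
  | succ k ih =>
    simp only [pvReach, List.any_eq_true] at hr
    obtain ⟨s, hs, hr'⟩ := hr
    have h1 := ih (v - s) hr'
    have h2 := h s hs
    push_cast
    omega

-- the minimal representation of v ≤ req only uses positive sizes ≤ req
theorem reach_to_filter (cs : List Int) (hcs : ∀ s ∈ cs, 0 ≤ s) (req : Int) :
    ∀ (m : Nat) (v : Int), 0 ≤ v → v ≤ req → pvMin cs v = some m →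
      pvReach (cs.filter (fun s => decide (0 < s ∧ s ≤ req))) m v = true := by
  intro m
  induction m with
  | zero =>
    intro v _ _ hm
    exact (pvMin_some _ _ _ hm).1
  | succ m ih =>
    intro v hv0 hvr hm
    obtain ⟨h1, h2⟩ := pvMin_some cs v _ hm
    simp only [pvReach, List.any_eq_true] at h1
    obtain ⟨s, hs, hr⟩ := h1
    have hs0 := hcs s hs
    have hsne : s ≠ 0 := by
      rintro rfl
      have hrv : pvReach cs m v = true := by simpa using hr
      rw [h2 m (Nat.lt_succ_self m)] at hrv
      exact Bool.false_eq_true.mp hrv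
    have hvs0 : 0 ≤ v - s := reach_nonneg cs hcs m _ hr
    obtain ⟨j, hj, hjle⟩ := min_le_of_reach cs hcs m (v - s) hr
    have hjm : j = m := by
      rcases Nat.lt_or_ge j m with hlt | hge
      · exfalso
        have hrj : pvReach cs (j+1) v = true := by
          simp only [pvReach, List.any_eq_true]
          exact ⟨s, hs, (pvMin_some _ _ _ hj).1⟩
        rw [h2 (j+1) (by omega)] at hrj
        exact Bool.false_eq_true.mp hrj
      · omega
    subst hjm
    have hPs : s ∈ cs.filter (fun s => decide (0 < s ∧ s ≤ req)) := by
      rw [List.mem_filter]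
      refine ⟨hs, ?_⟩
      simp only [decide_eq_true_eq]
      omega
    have hrec := ih (v - s) hvs0 (by omega) hj
    simp only [pvReach, List.any_eq_true]
    exact ⟨s, hPs, hrec⟩

theorem pvMin_restrict (cs : List Int) (hcs : ∀ s ∈ cs, 0 ≤ s) (req v : Int)
    (hv : 0 ≤ v) (hvr : v ≤ req) :
    pvMin (cs.filter (fun s => decide (0 < s ∧ s ≤ req))) v = pvMin cs v := by
  have hPsub : ∀ s ∈ cs.filter (fun s => decide (0 < s ∧ s ≤ req)), s ∈ cs := by
    intro s hs; exact (List.mem_filter.mp hs).1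
  have hPnn : ∀ s ∈ cs.filter (fun s => decide (0 < s ∧ s ≤ req)), 0 ≤ s := by
    intro s hs; exact hcs s (hPsub s hs)
  cases hM : pvMin cs v with
  | none =>
    rw [pvMin_none _ hPnn]
    intro k
    by_contra hk
    rw [Bool.not_eq_false] at hk
    have := pvReach_subset cs _ hPsub k v hk
    rw [(pvMin_none cs hcs v).mp hM k] at this
    exact Bool.false_eq_true.mp this
  | some m =>
    apply pvMin_of _ hPnn v m (reach_to_filter cs hcs req m v hv hvr hM)
    intro j hj
    by_contra hk
    rw [Bool.not_eq_false] at hk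
    have := pvReach_subset cs _ hPsub j v hk
    rw [(pvMin_some cs v m hM).2 j hj] at this
    exact Bool.false_eq_true.mp this

-- a sum at BFS level m+1 comes from a sum at level m, still within [0, req]
theorem pvDescend (steps : List Int) (hpos : ∀ s ∈ steps, 0 < s) (req : Int) (m : Nat) (v : Int)
    (hv0 : 0 ≤ v) (hvr : v ≤ req) (hm : pvMin steps v = some (m+1)) :
    ∃ w, 0 ≤ w ∧ w ≤ req ∧ pvMin steps w = some m := by
  have hnn : ∀ s ∈ steps, 0 ≤ s := fun s hs => le_of_lt (hpos s hs)
  obtain ⟨h1, h2⟩ := pvMin_some _ _ _ hm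
  simp only [pvReach, List.any_eq_true] at h1
  obtain ⟨s, hs, hr⟩ := h1
  have hspos := hpos s hs
  have hw0 : 0 ≤ v - s := reach_nonneg steps hnn m _ hr
  obtain ⟨j, hj, hjle⟩ := min_le_of_reach steps hnn m (v - s) hr
  have hjm : j = m := by
    rcases Nat.lt_or_ge j m with hlt | hge
    · exfalso
      have hrj : pvReach steps (j+1) v = true := by
        simp only [pvReach, List.any_eq_true]
        exact ⟨s, hs, (pvMin_some _ _ _ hj).1⟩
      rw [h2 (j+1) (by omega)] at hrj
      exact Bool.false_eq_true.mp hrj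
    · omega
  subst hjm
  exact ⟨v - s, hw0, by omega, hj⟩

theorem pvLevelDown (steps : List Int) (hpos : ∀ s ∈ steps, 0 < s) (req : Int) :
    ∀ (t : Nat) (v : Int) (k : Nat), 0 ≤ v → v ≤ req → pvMin steps v = some (k + t) →
      ∃ w, 0 ≤ w ∧ w ≤ req ∧ pvMin steps w = some k := by
  intro t
  induction t with
  | zero => intro v k hv0 hvr hm; exact ⟨v, hv0, hvr, hm⟩
  | succ t ih =>
    intro v k hv0 hvr hm
    obtain ⟨w, hw0, hwr, hw⟩ := pvDescend steps hpos req (k + t) v hv0 hvr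
      (by rw [hm]; congr 1)
    exact ih w k hw0 hwr hw

-- membership in the inner fold of pvBfsNext
theorem pvMemInner (steps : List Int) (v requirement : Int) (visited : List Int)
    (acc : PySem.Set Int) (y : Int) :
    y ∈ steps.foldl (fun acc s =>
      if v + s ≤ requirement ∧ v + s ∉ visited then PySem.Set.add acc (v + s) else acc) acc ↔
    y ∈ acc ∨ ∃ s ∈ steps, y = v + s ∧ y ≤ requirement ∧ y ∉ visited := by
  induction steps generalizing acc with
  | nil => simp
  | cons s ss ih =>
    rw [List.foldl_cons]
    by_cases h : v + s ≤ requirement ∧ v + s ∉ visited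
    · rw [if_pos h, ih, PySem.Set.mem_add]
      constructor
      · rintro (⟨hy | rfl⟩ | ⟨s', hs', rfl, h1, h2⟩)
        · exact Or.inl hy
        · exact Or.inr ⟨s, by simp, rfl, h.1, h.2⟩
        · exact Or.inr ⟨s', by simp [hs'], rfl, h1, h2⟩
      · rintro (hy | ⟨s', hs', rfl, h1, h2⟩)
        · exact Or.inl (Or.inl hy)
        · rcases List.mem_cons.mp hs' with rfl | hs''
          · exact Or.inl (Or.inr rfl)
          · exact Or.inr ⟨s', hs'', rfl, h1, h2⟩
    · rw [if_neg h, ih]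
      constructor
      · rintro (hy | ⟨s', hs', rfl, h1, h2⟩)
        · exact Or.inl hy
        · exact Or.inr ⟨s', by simp [hs'], rfl, h1, h2⟩
      · rintro (hy | ⟨s', hs', rfl, h1, h2⟩)
        · exact Or.inl hy
        · rcases List.mem_cons.mp hs' with rfl | hs''
          · exact absurd ⟨h1, h2⟩ h
          · exact Or.inr ⟨s', hs'', rfl, h1, h2⟩

theorem pvMemNext (requirement : Int) (steps visited frontier : PySem.Set Int) (y : Int) :
    y ∈ pvBfsNext requirement steps visited frontier ↔
    ∃ v ∈ frontier, ∃ s ∈ steps, y = v + s ∧ y ≤ requirement ∧ y ∉ visited := by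
  unfold pvBfsNext
  have hgen : ∀ (fr : List Int) (acc : PySem.Set Int),
      y ∈ fr.foldl (fun acc v => steps.foldl (fun acc s =>
        if v + s ≤ requirement ∧ v + s ∉ visited then PySem.Set.add acc (v + s) else acc) acc) acc ↔
      y ∈ acc ∨ ∃ v ∈ fr, ∃ s ∈ steps, y = v + s ∧ y ≤ requirement ∧ y ∉ visited := by
    intro fr
    induction fr with
    | nil => simp
    | cons v vs ih =>
      intro acc
      rw [List.foldl_cons, ih, pvMemInner]
      constructor
      · rintro ((hy | ⟨s, hs, rfl, h1, h2⟩) | ⟨v', hv', s, hs, rfl, h1, h2⟩)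
        · exact Or.inl hy
        · exact Or.inr ⟨v, by simp, s, hs, rfl, h1, h2⟩
        · exact Or.inr ⟨v', by simp [hv'], s, hs, rfl, h1, h2⟩
      · rintro (hy | ⟨v', hv', s, hs, rfl, h1, h2⟩)
        · exact Or.inl (Or.inl hy)
        · rcases List.mem_cons.mp hv' with rfl | hv''
          · exact Or.inl (Or.inr ⟨s, hs, rfl, h1, h2⟩)
          · exact Or.inr ⟨v', hv'', s, hs, rfl, h1, h2⟩
  rw [hgen]
  simp [PySem.Set.empty]

theorem pvBfsLoop_correct (req : Int) (hreq : 1 ≤ req) (steps : PySem.Set Int)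
    (hpos : ∀ s ∈ steps, 0 < s ∧ s ≤ req) :
    ∀ (fuel k : Nat) (visited frontier : PySem.Set Int),
      req.toNat + 2 ≤ fuel + k →
      (∀ v : Int, v ∈ frontier ↔ (v ≤ req ∧ 0 ≤ v ∧ pvMin steps v = some k)) →
      (∀ v : Int, v ∈ visited ↔ (v ≤ req ∧ 0 ≤ v ∧ ∃ j, j ≤ k ∧ pvMin steps v = some j)) →
      (∀ j, j < k → pvMin steps req ≠ some j) →
      pvBfsLoop req steps fuel visited frontier (k : Int) =
        (match pvMin steps req with | some m => (m : Int) | none => -1) := by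
  have hpos' : ∀ s ∈ steps, 0 < s := fun s hs => (hpos s hs).1
  intro fuel
  induction fuel with
  | zero =>
    intro k visited frontier hfuel hF hV hPast
    have hnone : pvMin steps req = none := by
      cases hM : pvMin steps req with
      | none => rfl
      | some m =>
        exfalso
        have hk : k ≤ m := by
          by_contra hlt
          exact hPast m (by omega) hM
        have hmle : (m : Int) ≤ req := pvReach_pos_le steps hpos' m req (pvMin_some _ _ _ hM).1
        omega
    rw [hnone]
    rfl
  | succ fuel ih =>
    intro k visited frontier hfuel hF hV hPast
    show (if frontier = [] then -1
      else if req ∈ frontier then (k : Int)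
      else pvBfsLoop req steps fuel
        (PySem.Set.union visited (pvBfsNext req steps visited frontier))
        (pvBfsNext req steps visited frontier) ((k : Int) + 1)) = _
    by_cases hE : frontier = []
    · rw [if_pos hE]
      have hnone : pvMin steps req = none := by
        cases hM : pvMin steps req with
        | none => rfl
        | some m =>
          exfalso
          have hk : k ≤ m := by
            by_contra hlt
            exact hPast m (by omega) hM
          obtain ⟨w, hw0, hwr, hw⟩ := pvLevelDown steps hpos' req (m - k) req k
            (by omega) le_rfl (by rw [hM]; congr 1; omega)
          have : w ∈ frontier := (hF w).mpr ⟨hwr, hw0, hw⟩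
          rw [hE] at this
          exact absurd this (List.not_mem_nil)
      rw [hnone]
    · rw [if_neg hE]
      by_cases hR : req ∈ frontier
      · rw [if_pos hR]
        have := ((hF req).mp hR).2.2
        rw [this]
      · rw [if_neg hR]
        have hPast' : ∀ j, j < k + 1 → pvMin steps req ≠ some j := by
          intro j hj hM
          rcases Nat.lt_or_ge j k with hlt | hge
          · exact hPast j hlt hM
          · have hjk : j = k := by omega
            subst hjk
            exact hR ((hF req).mpr ⟨le_rfl, by omega, hM⟩)
        have hF' : ∀ v : Int, v ∈ pvBfsNext req steps visited frontier ↔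
            (v ≤ req ∧ 0 ≤ v ∧ pvMin steps v = some (k + 1)) := by
          intro v
          rw [pvMemNext]
          constructor
          · rintro ⟨u, hu, s, hs, rfl, h1, h2⟩
            obtain ⟨hur, hu0, hum⟩ := (hF u).mp hu
            obtain ⟨hs1, _⟩ := hpos s hs
            refine ⟨h1, by omega, ?_⟩
            have hr : pvReach steps (k + 1) (u + s) = true := by
              simp only [pvReach, List.any_eq_true]
              refine ⟨s, hs, ?_⟩
              have : u + s - s = u := by ring
              rw [this]
              exact (pvMin_some _ _ _ hum).1
            obtain ⟨j, hj, hjle⟩ := min_le_of_reach steps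
              (fun s hs => le_of_lt (hpos' s hs)) (k + 1) (u + s) hr
            have hjk : j = k + 1 := by
              rcases Nat.lt_or_ge j (k + 1) with hlt | hge
              · exfalso
                exact h2 ((hV (u + s)).mpr ⟨h1, by omega, j, by omega, hj⟩)
              · omega
            rw [← hjk]
            exact hj
          · rintro ⟨h1, h2, h3⟩
            obtain ⟨hr, hmin⟩ := pvMin_some _ _ _ h3
            simp only [pvReach, List.any_eq_true] at hr
            obtain ⟨s, hs, hr'⟩ := hr
            obtain ⟨hs1, _⟩ := hpos s hs
            have hnn : ∀ x ∈ steps, 0 ≤ x := fun x hx => le_of_lt (hpos' x hx)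
            have hu0 : 0 ≤ v - s := reach_nonneg steps hnn k _ hr'
            obtain ⟨j, hj, hjle⟩ := min_le_of_reach steps hnn k (v - s) hr'
            have hjk : j = k := by
              rcases Nat.lt_or_ge j k with hlt | hge
              · exfalso
                have hrj : pvReach steps (j+1) v = true := by
                  simp only [pvReach, List.any_eq_true]
                  exact ⟨s, hs, (pvMin_some _ _ _ hj).1⟩
                rw [hmin (j+1) (by omega)] at hrj
                exact Bool.false_eq_true.mp hrj
              · omega
            rw [hjk] at hj
            refine ⟨v - s, (hF (v - s)).mpr ⟨by omega, hu0, hj⟩, s, hs, by ring, h1, ?_⟩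
            intro hvis
            obtain ⟨_, _, j', hj'1, hj'2⟩ := (hV v).mp hvis
            rw [h3] at hj'2
            have hkj : k + 1 = j' := by injection hj'2
            omega
        have hV' : ∀ v : Int, v ∈ PySem.Set.union visited (pvBfsNext req steps visited frontier) ↔
            (v ≤ req ∧ 0 ≤ v ∧ ∃ j, j ≤ k + 1 ∧ pvMin steps v = some j) := by
          intro v
          rw [PySem.Set.mem_union, hV v, hF' v]
          constructor
          · rintro (⟨h1, h2, j, hj1, hj2⟩ | ⟨h1, h2, h3⟩)
            · exact ⟨h1, h2, j, by omega, hj2⟩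
            · exact ⟨h1, h2, k + 1, le_rfl, h3⟩
          · rintro ⟨h1, h2, j, hj1, hj2⟩
            rcases Nat.lt_or_ge j (k + 1) with hlt | hge
            · exact Or.inl ⟨h1, h2, j, by omega, hj2⟩
            · have : j = k + 1 := by omega
              subst this
              exact Or.inr ⟨h1, h2, hj2⟩
        have := ih (k + 1) (PySem.Set.union visited (pvBfsNext req steps visited frontier))
          (pvBfsNext req steps visited frontier) (by omega) hF' hV' hPast'
        have hcast : ((k : Int) + 1) = (((k + 1 : Nat)) : Int) := by push_cast; ring
        rw [hcast]
        exact this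

theorem getUmbrellas_alt_pos (req : Int) (sizes : List Int) (hreq : 1 ≤ req)
    (hcs : ∀ s ∈ sizes, 0 ≤ s) :
    getUmbrellas_alt req sizes = (match pvCell sizes req with
      | some v => v
      | none => -1) := by
  unfold getUmbrellas_alt
  rw [if_neg (by omega)]
  dsimp only
  have hofl : (PySem.Set.ofList [(0 : Int)]) = [(0 : Int)] := by decide
  have hmem : ∀ s : Int, s ∈ PySem.Set.ofList (sizes.filter (fun s => decide (0 < s ∧ s ≤ req))) ↔
      s ∈ sizes.filter (fun s => decide (0 < s ∧ s ≤ req)) := by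
    intro s; simp [PySem.Set.mem_ofList]
  have hpos : ∀ s ∈ PySem.Set.ofList (sizes.filter (fun s => decide (0 < s ∧ s ≤ req))),
      0 < s ∧ s ≤ req := by
    intro s hs
    have := List.mem_filter.mp ((hmem s).mp hs)
    simpa using this.2
  have hminReq : pvMin (PySem.Set.ofList (sizes.filter (fun s => decide (0 < s ∧ s ≤ req)))) req =
      pvMin sizes req := by
    rw [pvMin_congr _ (sizes.filter (fun s => decide (0 < s ∧ s ≤ req))) hmem req,
      pvMin_restrict sizes hcs req req (by omega) le_rfl]
  have hF0 : ∀ v : Int, v ∈ (PySem.Set.ofList [(0:Int)]) ↔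
      (v ≤ req ∧ 0 ≤ v ∧
        pvMin (PySem.Set.ofList (sizes.filter (fun s => decide (0 < s ∧ s ≤ req)))) v = some 0) := by
    intro v
    rw [hofl]
    constructor
    · intro hv
      have : v = 0 := by simpa using hv
      subst this
      exact ⟨by omega, le_rfl, pvMin_zero _⟩
    · rintro ⟨_, _, h⟩
      have := (pvMin_some _ _ _ h).1
      simp only [pvReach, beq_iff_eq] at this
      simp [this]
  have hV0 : ∀ v : Int, v ∈ (PySem.Set.ofList [(0:Int)]) ↔
      (v ≤ req ∧ 0 ≤ v ∧ ∃ j, j ≤ 0 ∧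
        pvMin (PySem.Set.ofList (sizes.filter (fun s => decide (0 < s ∧ s ≤ req)))) v = some j) := by
    intro v
    rw [hofl]
    constructor
    · intro hv
      have : v = 0 := by simpa using hv
      subst this
      exact ⟨by omega, le_rfl, 0, le_rfl, pvMin_zero _⟩
    · rintro ⟨_, _, j, hj, h⟩
      have hj0 : j = 0 := by omega
      subst hj0
      have := (pvMin_some _ _ _ h).1
      simp only [pvReach, beq_iff_eq] at this
      simp [this]
  have hloop := pvBfsLoop_correct req hreq _ hpos (req.toNat + 2) 0
    (PySem.Set.ofList [0]) (PySem.Set.ofList [0]) (by omega) hF0 hV0 (by omega)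
  simp only [Nat.cast_zero] at hloop
  rw [hloop, hminReq]
  unfold pvCell
  cases pvMin sizes req <;> rfl

-- ===== VERDICT (by name: the statement is the Claim_ definition above) =====
theorem getUmbrellas_spec : Claim_equal_getUmbrellas := by
  intro requirement sizes hdom hpre
  unfold Spec_getUmbrellas
  rcases lt_or_ge requirement 0 with hr | hr
  · rw [getUmbrellas_neg requirement sizes hr hpre]
    unfold getUmbrellas_alt
    rw [if_pos (by omega)]
  · have hcs : ∀ s ∈ sizes, 0 ≤ s := by
      intro s hs; have := hpre s hs; simpa [if_pos hr] using this
    rcases eq_or_lt_of_le hr with hz | hpos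
    · -- requirement = 0
      have h0 : requirement = 0 := hz.symm
      subst h0
      have hA := getUmbrellas_nonneg 0 sizes hcs
      simp only [Nat.cast_zero] at hA
      rw [hA]
      unfold getUmbrellas_alt
      rw [if_pos (by omega)]
      unfold pvCell
      rw [pvMin_zero]
      rfl
    · obtain ⟨n, rfl⟩ : ∃ n : Nat, requirement = (n : Int) :=
        ⟨requirement.toNat, (Int.toNat_of_nonneg hr).symm⟩
      rw [getUmbrellas_nonneg n sizes hcs, getUmbrellas_alt_pos (n : Int) sizes (by omega) hcs]
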